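-- pv_equiv track=rewrite | github.com/sarnthil/extract-emotion-data | scripts/retokenize.py | realign
-- ===== SOURCE A (Python) =====
-- def realign(new, old, tags):
--     new = list(reversed(new))
--     old = list(reversed(old))
--     tags = list(reversed(tags))
--     while new or old:
--         n = new.pop()
--         o = old.pop()
--         t = tags.pop()
--         if n == o:
--             yield t
--             continue
--         if o.startswith(n):
--             yield t
--             old.append(o[len(n) :])
--             tags.append(t if t != "B" else "I")
--             continue
--         assert False, f"Tokenizer joined stuff seperated by spaces: {o} vs {n}"
--     assert not any([new, old, tags])
-- ===== SOURCE B (Python) =====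
-- def realign(new, old, tags):
--     # Walks old/tags pairwise with a char position into the current old token and a
--     # single index into new; no reversed copies, no list mutation.
--     i = 0
--     for o, t in zip(old, tags):
--         yield t
--         cont = "I" if t == "B" else t
--         pos = 0
--         while True:
--             n = new[i]
--             i += 1
--             assert o[pos:pos + len(n)] == n, f"Tokenizer joined stuff seperated by spaces: {o[pos:]} vs {n}"
--             pos += len(n)
--             if pos == len(o):
--                 break
--             yield cont
--     assert i == len(new) and len(old) == len(tags)
-- ===== Notes on version B (the rewrite author's own statement) =====
-- stated objective: alternative
-- what changed: Replaces A's three reversed working copies mutated by pop/append (re-queuing the unmatched remainder of the current old token as a new stack entry) with a single forward pass: a for-loop over zip(old, tags) that keeps a character position inside the current old token and one index into new, emitting the tag run per old token; no list mutation at all.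
import Mathlib
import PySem

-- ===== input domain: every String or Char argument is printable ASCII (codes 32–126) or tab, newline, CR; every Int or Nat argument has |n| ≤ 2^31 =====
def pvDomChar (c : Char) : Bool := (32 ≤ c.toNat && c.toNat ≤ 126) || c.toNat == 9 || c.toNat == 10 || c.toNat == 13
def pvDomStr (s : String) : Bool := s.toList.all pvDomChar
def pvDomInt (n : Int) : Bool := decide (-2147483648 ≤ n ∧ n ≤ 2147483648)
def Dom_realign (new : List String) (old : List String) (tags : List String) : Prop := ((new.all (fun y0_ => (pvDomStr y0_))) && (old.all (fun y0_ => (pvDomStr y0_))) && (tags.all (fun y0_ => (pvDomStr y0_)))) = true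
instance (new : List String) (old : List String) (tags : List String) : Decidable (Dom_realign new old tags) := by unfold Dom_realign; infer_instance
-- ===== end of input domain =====

-- B walks old/tags pairwise with a char position instead of mutating three reversed stacks.
-- Both Pythons are generators; the ports return the list of yielded tags. On inputs where the
-- generators raise (excluded by Pre_) the ports return the arbitrary partial output.

-- ===== PORT A =====
-- A pops from the back of three reversed copies and pushes the unmatched remainder of the
-- current old token (with its tag turned from "B" to "I") back onto the old/tags stacks.
def realignLoopA (newR oldR tagsR acc : List String) : List String :=
  if newR.isEmpty && oldR.isEmpty then acc          -- while new or old: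
  else
    match hn : newR.getLast? with
    | none => acc                                   -- n = new.pop() raises IndexError
    | some n =>
      match oldR.getLast? with
      | none => acc                                 -- o = old.pop() raises IndexError
      | some o =>
        match tagsR.getLast? with
        | none => acc                               -- t = tags.pop() raises IndexError
        | some t =>
          if n = o then
            realignLoopA newR.dropLast oldR.dropLast tagsR.dropLast (acc ++ [t])
          else if PySem.Str.startswith o n then
            realignLoopA newR.dropLast
              (oldR.dropLast ++ [PySem.Str.slice o (some (PySem.Str.len n)) none])
              (tagsR.dropLast ++ [if t ≠ "B" then t else "I"])
              (acc ++ [t])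
          else acc                                  -- assert False
termination_by newR.length
decreasing_by
  all_goals
    (have hne : newR ≠ [] := by rintro rfl; simp at hn
     have := List.length_pos_of_ne_nil hne
     simp [List.length_dropLast]; omega)

def realign (new : List String) (old : List String) (tags : List String) : List String :=
  realignLoopA new.reverse old.reverse tags.reverse []

-- ===== PORT B =====
-- One block of B's inner while-loop: consume new[i], check it against o at char position pos,
-- yield cont on continuation, stop when pos reaches len(o). none = the generator raises.
def innerB (new : List String) (o cont : String) (i : Nat) (pos : Int) (acc : List String) :
    Option (List String × Nat) :=
  if hi : i < new.length then                       -- n = new[i] raises IndexError when out of range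
    if PySem.Str.slice o (some pos) (some (pos + PySem.Str.len new[i])) = new[i] then
      if pos + PySem.Str.len new[i] = PySem.Str.len o then some (acc, i + 1)
      else innerB new o cont (i + 1) (pos + PySem.Str.len new[i]) (acc ++ [cont])
    else none                                       -- assert fails
  else none
termination_by new.length - i
decreasing_by omega

-- for o, t in zip(old, tags): yield t, then run the inner loop.
def outerB (new : List String) (pairs : List (String × String)) (i : Nat) (acc : List String) :
    List String :=
  match pairs with
  | [] => acc
  | (o, t) :: rest =>
    match innerB new o (if t = "B" then "I" else t) i 0 (acc ++ [t]) with
    | none => acc ++ [t]                            -- generator raised mid-block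
    | some (acc', i') => outerB new rest i' acc'

def realign_alt (new : List String) (old : List String) (tags : List String) : List String :=
  outerB new (old.zip tags) 0 []

-- ===== PRECONDITION & SPEC =====
-- Whether A's generator runs to completion is by nature the greedy-alignment condition:
-- each old token must be consumed exactly by a run of new tokens.  canAlign states that
-- condition on new/old alone (no tags, no output).
def canAlign : List String → List String → Bool
  | [], [] => true
  | _ :: _, [] => false
  | [], _ :: _ => false
  | n :: ns, o :: os =>
    if n = o then canAlign ns os
    else if PySem.Str.startswith o n then
      canAlign ns (PySem.Str.slice o (some (PySem.Str.len n)) none :: os)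
    else false

-- Pre_ = exactly the inputs on which A's generator is exhausted without an exception:
-- tags must pair off with old and new must realign onto old.
def Pre_realign (new : List String) (old : List String) (tags : List String) : Prop :=
  tags.length = old.length ∧ canAlign new old = true
instance (new : List String) (old : List String) (tags : List String) : Decidable (Pre_realign new old tags) := by unfold Pre_realign; infer_instance

def pvWitness_realign : List String × List String × List String :=
  (["foo", "bar", "baz"], ["foobar", "baz"], ["B", "O"])

def Spec_realign (new : List String) (old : List String) (tags : List String) (out : List String) : Prop := out = realign_alt new old tags
instance (new : List String) (old : List String) (tags : List String) (out : List String) : Decidable (Spec_realign new old tags out) := by unfold Spec_realign; infer_instance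

-- ===== CLAIM (what is proved, stated in full; the proofs are below) =====
def Claim_equal_realign : Prop := ∀ (new : List String) (old : List String) (tags : List String), Dom_realign new old tags → Pre_realign new old tags → Spec_realign new old tags (realign new old tags)

-- ===== LEMMAS AND PROOFS =====

-- Reference function: A's loop read off the front of the original lists (popping the back of a
-- reversed copy = taking the head; the pushed remainder becomes the new head).
def aRef : List String → List String → List String → List String
  | n :: ns, o :: os, t :: ts =>
    if n = o then t :: aRef ns os ts
    else if PySem.Str.startswith o n then
      t :: aRef ns (PySem.Str.slice o (some (PySem.Str.len n)) none :: os)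
            ((if t ≠ "B" then t else "I") :: ts)
    else []
  | _, _, _ => []
termination_by ns _ _ => ns.length

theorem str_len_eq (s : String) : PySem.Str.len s = (s.toList.length : Int) := by
  exact PySem.Str.len_eq s

theorem slice_from_toList (o : String) (p : Nat) :
    (PySem.Str.slice o (some (p : Int)) none).toList = o.toList.drop p := by
  simp [pysem]

theorem slice_from_zero (o : String) : PySem.Str.slice o (some ((0 : Nat) : Int)) none = o := by
  apply String.toList_inj.mp; simp [pysem]

theorem slice_from_add (o n : String) (p : Nat) :
    PySem.Str.slice (PySem.Str.slice o (some (p : Int)) none) (some (PySem.Str.len n)) none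
      = PySem.Str.slice o (some ((p + n.toList.length : Nat) : Int)) none := by
  apply String.toList_inj.mp
  simp [pysem, List.drop_drop]
  rw [show ((p : Int) + (n.length : Int)) = ((p + n.length : Nat) : Int) by push_cast; ring,
    PySem.List.slice_from_natCast]

theorem sliceEq_iff (o n : String) (p : Nat) :
    (PySem.Str.slice o (some (p : Int)) (some ((p : Int) + PySem.Str.len n)) = n)
      ↔ (o.toList.drop p).take n.toList.length = n.toList := by
  rw [← String.toList_inj]
  simp [pysem]

theorem startswith_iff_take (r n : String) :
    PySem.Str.startswith r n = true ↔ r.toList.take n.toList.length = n.toList := by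
  rw [PySem.Str.startswith_eq, PySem.Chars.startswith_iff, List.prefix_iff_eq_take]
  constructor <;> (intro h; exact h.symm)

theorem realignLoopA_eq_aRef (ns : List String) :
    ∀ (os ts acc : List String),
      realignLoopA ns.reverse os.reverse ts.reverse acc = acc ++ aRef ns os ts := by
  induction ns with
  | nil =>
    intro os ts acc
    cases os with
    | nil => rw [realignLoopA]; simp [aRef]
    | cons o os' => rw [realignLoopA]; simp [aRef]
  | cons n ns ih =>
    intro os ts acc
    cases os with
    | nil =>
      rw [realignLoopA]
      split
      · rename_i h; simp at h
      · split <;> simp [aRef]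
    | cons o os' =>
      cases ts with
      | nil =>
        rw [realignLoopA]
        split
        · rename_i h; simp at h
        · split
          · simp [aRef]
          · split
            · simp [aRef]
            · simp [aRef]
      | cons t ts' =>
        rw [realignLoopA]
        split
        · rename_i h; simp at h
        · split
          · rename_i h; rw [List.getLast?_reverse] at h; simp at h
          · rename_i n1 hn1
            have hn1' : n = n1 := by
              rw [List.getLast?_reverse, List.head?_cons] at hn1
              exact Option.some.inj hn1
            subst hn1'
            split
            · rename_i h; rw [List.getLast?_reverse] at h; simp at h
            · rename_i o1 ho1
              have ho1' : o = o1 := by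
                rw [List.getLast?_reverse, List.head?_cons] at ho1
                exact Option.some.inj ho1
              subst ho1'
              split
              · rename_i h; rw [List.getLast?_reverse] at h; simp at h
              · rename_i t1 ht1
                have ht1' : t = t1 := by
                  rw [List.getLast?_reverse, List.head?_cons] at ht1
                  exact Option.some.inj ht1
                subst ht1'
                simp only [List.dropLast_reverse, List.tail_cons]
                by_cases h1 : n = o
                · rw [if_pos h1, ih os' ts' (acc ++ [t])]
                  simp [aRef, h1]
                · rw [if_neg h1]
                  by_cases h2 : PySem.Str.startswith o n = true
                  · rw [if_pos h2]
                    have hpush : os'.reverse ++ [PySem.Str.slice o (some (PySem.Str.len n)) none]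
                        = (PySem.Str.slice o (some (PySem.Str.len n)) none :: os').reverse := by
                      simp
                    have hpusht : ts'.reverse ++ [if t ≠ "B" then t else "I"]
                        = ((if t ≠ "B" then t else "I") :: ts').reverse := by simp
                    rw [hpush, hpusht, ih]
                    have h2' : PySem.Chars.startswith o.toList n.toList = true := by
                      rw [← PySem.Str.startswith_eq]; exact h2
                    simp [aRef, h1, h2']
                  · rw [if_neg h2]
                    have h2' : ¬ PySem.Chars.startswith o.toList n.toList = true := by
                      rw [← PySem.Str.startswith_eq]; exact h2
                    simp [aRef, h1, h2']

theorem innerB_spec (new : List String) (o : String) (k : Nat) :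
    ∀ (i p : Nat) (olds tgs : List String) (tcur cont : String) (acc : List String),
      k = new.length - i →
      p ≤ o.toList.length →
      (if tcur = "B" then "I" else tcur) = cont →
      canAlign (new.drop i) (PySem.Str.slice o (some (p : Int)) none :: olds) = true →
      ∃ i' em,
        innerB new o cont i (p : Int) acc = some (acc ++ em, i')
        ∧ aRef (new.drop i) (PySem.Str.slice o (some (p : Int)) none :: olds) (tcur :: tgs)
            = tcur :: (em ++ aRef (new.drop i') olds tgs)
        ∧ canAlign (new.drop i') olds = true := by
  induction k with
  | zero =>
    intro i p olds tgs tcur cont acc hk hp hmut halign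
    rw [List.drop_eq_nil_of_le (by omega)] at halign
    simp [canAlign] at halign
  | succ k ih =>
    intro i p olds tgs tcur cont acc hk hp hmut halign
    by_cases hi : i < new.length
    case neg =>
      rw [List.drop_eq_nil_of_le (by omega)] at halign
      simp [canAlign] at halign
    have hdrop : new.drop i = new[i] :: new.drop (i + 1) := List.drop_eq_getElem_cons hi
    have hrl : (PySem.Str.slice o (some (p : Int)) none).toList = o.toList.drop p :=
      slice_from_toList o p
    rw [hdrop] at halign ⊢
    rw [canAlign] at halign
    rw [innerB, dif_pos hi]
    by_cases h1 : new[i] = PySem.Str.slice o (some (p : Int)) none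
    · -- new[i] equals the whole remainder: the block ends here
      rw [if_pos h1] at halign
      have htake : (o.toList.drop p).take (new[i]).toList.length = (new[i]).toList := by
        rw [h1, hrl]; exact List.take_length
      have hlen : (p : Int) + PySem.Str.len new[i] = PySem.Str.len o := by
        have hl2 : (new[i]).toList.length = o.toList.length - p := by rw [h1, hrl]; simp
        rw [str_len_eq, str_len_eq, hl2]; omega
      rw [if_pos ((sliceEq_iff o new[i] p).mpr htake), if_pos hlen]
      refine ⟨i + 1, [], by simp, ?_, halign⟩
      rw [aRef, if_pos h1]
      simp
    · -- new[i] is a proper prefix of the remainder: the block continues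
      rw [if_neg h1] at halign
      by_cases h2 : PySem.Str.startswith (PySem.Str.slice o (some (p : Int)) none) new[i] = true
      · rw [if_pos h2] at halign
        have htake : (o.toList.drop p).take (new[i]).toList.length = (new[i]).toList := by
          rw [← hrl]; exact (startswith_iff_take _ _).mp h2
        have hLle : (new[i]).toList.length ≤ o.toList.length - p := by
          have hc := congrArg List.length htake
          rw [List.length_take, List.length_drop] at hc
          omega
        have hne : ¬ ((p : Int) + PySem.Str.len new[i] = PySem.Str.len o) := by
          intro h
          apply h1
          apply String.toList_inj.mp
          have hl2 : (new[i]).toList.length = o.toList.length - p := by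
            rw [str_len_eq, str_len_eq] at h; omega
          calc (new[i]).toList = (o.toList.drop p).take (new[i]).toList.length := htake.symm
            _ = o.toList.drop p := by rw [hl2]; exact List.take_of_length_le (by simp)
            _ = (PySem.Str.slice o (some (p : Int)) none).toList := hrl.symm
        rw [if_pos ((sliceEq_iff o new[i] p).mpr htake), if_neg hne]
        have hcast : (p : Int) + PySem.Str.len new[i]
            = ((p + (new[i]).toList.length : Nat) : Int) := by
          rw [str_len_eq]; push_cast; ring
        have hcontB : (if cont = "B" then "I" else cont) = cont := by
          by_cases hb : tcur = "B"
          · subst hb; rw [if_pos rfl] at hmut; rw [← hmut, if_neg (by decide)]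
          · rw [if_neg hb] at hmut; rw [← hmut, if_neg hb]
        have halign' : canAlign (new.drop (i + 1))
            (PySem.Str.slice o (some ((p + (new[i]).toList.length : Nat) : Int)) none :: olds)
            = true := by
          rw [← slice_from_add]
          exact halign
        obtain ⟨i', em', he1, he2, he3⟩ :=
          ih (i + 1) (p + (new[i]).toList.length) olds tgs cont cont (acc ++ [cont])
            (by omega) (by omega) hcontB halign'
        refine ⟨i', cont :: em', ?_, ?_, he3⟩
        · rw [hcast, he1]; simp
        · rw [aRef, if_neg h1, if_pos h2]
          have hpt : (if tcur ≠ "B" then tcur else "I") = cont := by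
            by_cases hb : tcur = "B"
            · subst hb; rw [if_pos rfl] at hmut; rw [← hmut, if_neg (by simp)]
            · rw [if_neg hb] at hmut; rw [← hmut, if_pos hb]
          rw [hpt, slice_from_add, he2]
          simp
      · rw [if_neg h2] at halign
        simp at halign

theorem outerB_spec (new : List String) (pairs : List (String × String)) :
    ∀ (i : Nat) (acc : List String),
      canAlign (new.drop i) (pairs.map Prod.fst) = true →
      outerB new pairs i acc
        = acc ++ aRef (new.drop i) (pairs.map Prod.fst) (pairs.map Prod.snd) := by
  induction pairs with
  | nil =>
    intro i acc _
    rw [outerB]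
    cases h : new.drop i <;> simp [aRef]
  | cons pr rest ih =>
    obtain ⟨o, t⟩ := pr
    intro i acc halign
    simp only [List.map_cons] at halign ⊢
    have halign0 : canAlign (new.drop i)
        (PySem.Str.slice o (some ((0 : Nat) : Int)) none :: rest.map Prod.fst) = true := by
      rw [slice_from_zero]; exact halign
    obtain ⟨i', em, h1, h2, h3⟩ :=
      innerB_spec new o (new.length - i) i 0 (rest.map Prod.fst) (rest.map Prod.snd) t
        (if t = "B" then "I" else t) (acc ++ [t]) rfl (Nat.zero_le _) rfl halign0
    rw [slice_from_zero] at h2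
    push_cast at h1
    rw [outerB, h1]
    change outerB new rest i' (acc ++ [t] ++ em) = _
    rw [ih i' ((acc ++ [t]) ++ em) h3, h2]
    simp

-- ===== VERDICT (by name: the statement is the Claim_ definition above) =====
theorem realign_spec : Claim_equal_realign := by
  intro new old tags _ hpre
  obtain ⟨hlen, halign⟩ := hpre
  unfold Spec_realign realign realign_alt
  have hb := outerB_spec new (old.zip tags) 0 []
  rw [List.drop_zero, List.map_fst_zip (le_of_eq hlen.symm),
      List.map_snd_zip (le_of_eq hlen)] at hb
  rw [hb halign, realignLoopA_eq_aRef]
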